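-- pv_equiv track=rewrite | github.com/leomv09/BabylonTowerSolver | ui/file.py | validate_amount_balls
-- ===== SOURCE A (Python) =====
-- def validate_amount_balls(matrix):
--     """Validate  amount of balls
--
--     parameters:
--         Matrix matrix
--
--
--     return:
--         [String] amount balls errors
--     """
--     balls = [0, 0, 0, 0, 0, 0] #[red balls, Green balls , Blue balls,Yellow balls,-,*]
--     errors = ""
--     for row in matrix:
--             balls[0] += row.count("R")
--             balls[1] += row.count("G")
--             balls[2] += row.count("B")
--             balls[3] += row.count("Y")
--             balls[4] += row.count("-")
--             balls[5] += row.count("*")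
--
--     if balls[0] != 4:
--         errors += "error en la cantidad de bolas rojas: aparecen " + str(balls[0]) + "\n"
--     if balls[1] != 4:
--         errors += "error en la cantidad de bolas verdes: aparecen " + str(balls[1]) + "\n"
--     if balls[2] != 4:
--         errors += "error en la cantidad de bolas azules: aparecen " + str(balls[2]) + "\n"
--     if balls[3] != 4:
--         errors += "error en la cantidad de bolas amarillas: aparecen " + str(balls[3]) + "\n"
--     if balls[4] != 3:
--         errors += "error en la cantidad de espacio bloqueado: aparecen: " + str(balls[4]) + "\n"
--     if balls[5] != 1:
--         errors += "error en la cantidad de muesca aparecen: " + str(balls[5]) + "\n"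
--     return errors
-- ===== SOURCE B (Python) =====
-- def validate_amount_balls(matrix):
--     """Validate amount of balls.
--
--     Different strategy: flatten the matrix into one string, sort its
--     characters, and recover each character's total by run-length scanning
--     the sorted sequence; then drive the error messages from a table.
--     """
--     chars = sorted("".join(matrix))
--     counts = {}
--     prev = None
--     run = 0
--     for ch in chars:
--         if prev is not None and ch == prev:
--             run += 1
--         else:
--             if prev is not None:
--                 counts[prev] = counts.get(prev, 0) + run
--             prev = ch
--             run = 1
--     if prev is not None:
--         counts[prev] = counts.get(prev, 0) + run
--     table = [
--         ("R", 4, "error en la cantidad de bolas rojas: aparecen "),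
--         ("G", 4, "error en la cantidad de bolas verdes: aparecen "),
--         ("B", 4, "error en la cantidad de bolas azules: aparecen "),
--         ("Y", 4, "error en la cantidad de bolas amarillas: aparecen "),
--         ("-", 3, "error en la cantidad de espacio bloqueado: aparecen: "),
--         ("*", 1, "error en la cantidad de muesca aparecen: "),
--     ]
--     errors = ""
--     for ch, expected, msg in table:
--         n = counts.get(ch, 0)
--         if n != expected:
--             errors += msg + str(n) + "\n"
--     return errors
-- ===== Notes on version B (the rewrite author's own statement) =====
-- stated objective: alternative
-- what changed: Instead of six per-row str.count accumulations and six copy-pasted if-blocks, B flattens the matrix into one string, sorts its characters, recovers the totals by a run-length scan of the sorted sequence, and emits the errors from a (char, expected, message) table loop.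
import Mathlib
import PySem

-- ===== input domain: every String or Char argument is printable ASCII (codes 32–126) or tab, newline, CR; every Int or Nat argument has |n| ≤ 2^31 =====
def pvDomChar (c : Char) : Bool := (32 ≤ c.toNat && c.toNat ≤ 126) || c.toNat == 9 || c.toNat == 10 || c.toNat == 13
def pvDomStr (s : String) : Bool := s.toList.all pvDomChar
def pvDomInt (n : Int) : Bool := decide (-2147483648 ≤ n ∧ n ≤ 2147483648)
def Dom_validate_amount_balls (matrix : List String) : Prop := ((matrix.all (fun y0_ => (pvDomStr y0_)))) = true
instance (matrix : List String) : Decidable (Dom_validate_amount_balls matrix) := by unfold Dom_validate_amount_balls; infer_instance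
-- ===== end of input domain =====

-- B replaces the six per-row str.count accumulations and six copy-pasted if-blocks by
-- sort-then-run-length-scan of the flattened matrix plus a message-table loop (alternative).

-- ===== PORT A =====
-- balls is Python's 6-element list, kept as a 6-tuple of Ints updated per row.
def validate_amount_balls (matrix : List String) : String :=
  let balls : Int × Int × Int × Int × Int × Int :=
    matrix.foldl (fun b row =>
      (b.1 + (PySem.Str.count row "R" : Int),
       b.2.1 + (PySem.Str.count row "G" : Int),
       b.2.2.1 + (PySem.Str.count row "B" : Int),
       b.2.2.2.1 + (PySem.Str.count row "Y" : Int),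
       b.2.2.2.2.1 + (PySem.Str.count row "-" : Int),
       b.2.2.2.2.2 + (PySem.Str.count row "*" : Int))) (0, 0, 0, 0, 0, 0)
  let errors : String := ""
  let errors := if balls.1 ≠ 4 then errors ++ "error en la cantidad de bolas rojas: aparecen " ++ PySem.Int.toStr balls.1 ++ "\n" else errors
  let errors := if balls.2.1 ≠ 4 then errors ++ "error en la cantidad de bolas verdes: aparecen " ++ PySem.Int.toStr balls.2.1 ++ "\n" else errors
  let errors := if balls.2.2.1 ≠ 4 then errors ++ "error en la cantidad de bolas azules: aparecen " ++ PySem.Int.toStr balls.2.2.1 ++ "\n" else errors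
  let errors := if balls.2.2.2.1 ≠ 4 then errors ++ "error en la cantidad de bolas amarillas: aparecen " ++ PySem.Int.toStr balls.2.2.2.1 ++ "\n" else errors
  let errors := if balls.2.2.2.2.1 ≠ 3 then errors ++ "error en la cantidad de espacio bloqueado: aparecen: " ++ PySem.Int.toStr balls.2.2.2.2.1 ++ "\n" else errors
  let errors := if balls.2.2.2.2.2 ≠ 1 then errors ++ "error en la cantidad de muesca aparecen: " ++ PySem.Int.toStr balls.2.2.2.2.2 ++ "\n" else errors
  errors

-- ===== PORT B =====
-- the (char, expected_count, message) table of Source B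
def pvBallTable : List (Char × Int × String) :=
  [('R', 4, "error en la cantidad de bolas rojas: aparecen "),
   ('G', 4, "error en la cantidad de bolas verdes: aparecen "),
   ('B', 4, "error en la cantidad de bolas azules: aparecen "),
   ('Y', 4, "error en la cantidad de bolas amarillas: aparecen "),
   ('-', 3, "error en la cantidad de espacio bloqueado: aparecen: "),
   ('*', 1, "error en la cantidad de muesca aparecen: ")]

-- one step of Source B's run-length loop body; state = (prev, run, counts)
def pvScanStep (st : Option Char × Int × PySem.Dict Char Int) (ch : Char) :
    Option Char × Int × PySem.Dict Char Int :=
  match st with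
  | (some p, run, d) =>
      if ch = p then (some p, run + 1, d)
      else (some ch, 1, d.insert p (d.getD p 0 + run))
  | (none, _, d) => (some ch, 1, d)

-- Source B's final 'if prev is not None: counts[prev] = ...' flush
def pvScanFlush (st : Option Char × Int × PySem.Dict Char Int) : PySem.Dict Char Int :=
  match st with
  | (some p, run, d) => d.insert p (d.getD p 0 + run)
  | (none, _, d) => d

def validate_amount_balls_alt (matrix : List String) : String :=
  let chars := PySem.List.sorted (PySem.Str.join "" matrix).toList (fun x => x) false
  let counts := pvScanFlush (chars.foldl pvScanStep (none, 0, PySem.Dict.empty))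
  pvBallTable.foldl (fun errors t =>
    let n := counts.getD t.1 0
    if n ≠ t.2.1 then errors ++ t.2.2 ++ PySem.Int.toStr n ++ "\n" else errors) ""

-- ===== PRECONDITION & SPEC =====
def Spec_validate_amount_balls (matrix : List String) (out : String) : Prop := out = validate_amount_balls_alt matrix
instance (matrix : List String) (out : String) : Decidable (Spec_validate_amount_balls matrix out) := by unfold Spec_validate_amount_balls; infer_instance

-- ===== CLAIM =====
def Claim_equal_validate_amount_balls : Prop := ∀ (matrix : List String), Dom_validate_amount_balls matrix → Spec_validate_amount_balls matrix (validate_amount_balls matrix)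

-- ===== LEMMAS AND PROOFS =====

-- total count of character c across the matrix
def pvCnt (matrix : List String) (c : Char) : Int :=
  (matrix.map (fun r => (r.toList.count c : Int))).sum

-- str.count with a single-character needle is List.count (unfolding count.go's fuel loop)
theorem pvCountGoSingle (c : Char) : ∀ (l : List Char) (fuel acc : Nat), l.length ≤ fuel →
    PySem.Chars.count.go [c] fuel l acc = acc + l.count c := by
  intro l
  induction l with
  | nil =>
    intro fuel acc _
    cases fuel <;> simp [PySem.Chars.count.go]
  | cons h t ih =>
    intro fuel acc hf
    cases fuel with
    | zero => simp at hf
    | succ f =>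
      have hlen : t.length ≤ f := by simp at hf; omega
      by_cases hch : c = h
      · subst hch
        simp only [PySem.Chars.count.go, List.isPrefixOf, BEq.rfl, Bool.true_and, if_true,
          List.length_cons, List.drop_succ_cons, List.length_nil, List.drop_zero]
        rw [ih f (acc + 1) hlen]
        simp
        omega
      · have hbeq : (c == h) = false := by simp [hch]
        simp only [PySem.Chars.count.go, List.isPrefixOf, hbeq, Bool.false_and]
        rw [ih f acc hlen]
        simp [Ne.symm hch]

theorem pvCharsCountSingle (s : List Char) (c : Char) :
    PySem.Chars.count s [c] = s.count c := by
  rw [PySem.Chars.count]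
  simp only [List.isEmpty_cons, Bool.false_eq_true, if_false]
  exact (pvCountGoSingle c s s.length 0 le_rfl).trans (by omega)

-- A's accumulating fold computes the six totals
theorem pvBallsFold (matrix : List String) :
    ∀ (b : Int × Int × Int × Int × Int × Int),
    matrix.foldl (fun b row =>
      (b.1 + (PySem.Str.count row "R" : Int),
       b.2.1 + (PySem.Str.count row "G" : Int),
       b.2.2.1 + (PySem.Str.count row "B" : Int),
       b.2.2.2.1 + (PySem.Str.count row "Y" : Int),
       b.2.2.2.2.1 + (PySem.Str.count row "-" : Int),
       b.2.2.2.2.2 + (PySem.Str.count row "*" : Int))) b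
    = (b.1 + pvCnt matrix 'R', b.2.1 + pvCnt matrix 'G', b.2.2.1 + pvCnt matrix 'B',
       b.2.2.2.1 + pvCnt matrix 'Y', b.2.2.2.2.1 + pvCnt matrix '-',
       b.2.2.2.2.2 + pvCnt matrix '*') := by
  induction matrix with
  | nil => intro b; simp [pvCnt]
  | cons r rs ih =>
    intro b
    simp only [List.foldl_cons, ih]
    simp only [PySem.Str.count_eq]
    have hR : PySem.Chars.count r.toList "R".toList = r.toList.count 'R' := pvCharsCountSingle _ _
    have hG : PySem.Chars.count r.toList "G".toList = r.toList.count 'G' := pvCharsCountSingle _ _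
    have hB : PySem.Chars.count r.toList "B".toList = r.toList.count 'B' := pvCharsCountSingle _ _
    have hY : PySem.Chars.count r.toList "Y".toList = r.toList.count 'Y' := pvCharsCountSingle _ _
    have hD : PySem.Chars.count r.toList "-".toList = r.toList.count '-' := pvCharsCountSingle _ _
    have hS : PySem.Chars.count r.toList "*".toList = r.toList.count '*' := pvCharsCountSingle _ _
    simp only [hR, hG, hB, hY, hD, hS, pvCnt, List.map_cons, List.sum_cons, Prod.mk.injEq]
    refine ⟨by ring, by ring, by ring, by ring, by ring, by ring⟩

-- '"".join' concatenates
theorem pvJoinFlatten (parts : List (List Char)) : PySem.Chars.join [] parts = parts.flatten := by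
  induction parts with
  | nil => simp [PySem.Chars.join, List.intercalate]
  | cons h t ih =>
    cases t with
    | nil => simp [PySem.Chars.join_singleton]
    | cons h2 t2 => rw [PySem.Chars.join_cons_cons, ih]; simp

-- one run-length step followed by flushing flushes one more occurrence
theorem pvFlushStep (st : Option Char × Int × PySem.Dict Char Int) (h c : Char) :
    (pvScanFlush (pvScanStep st h)).getD c 0
      = (pvScanFlush st).getD c 0 + (if c = h then 1 else 0) := by
  obtain ⟨prev, run, d⟩ := st
  cases prev with
  | none =>
    by_cases hc : c = h
    · subst hc; simp [pvScanStep, pvScanFlush]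
    · simp [pvScanStep, pvScanFlush, PySem.Dict.getD_insert, hc]
  | some p =>
    by_cases hp : h = p
    · subst hp
      by_cases hc : c = h
      · subst hc; simp [pvScanStep, pvScanFlush, PySem.Dict.getD_insert]; ring
      · simp [pvScanStep, pvScanFlush, PySem.Dict.getD_insert, hc]
    · by_cases hc : c = h
      · subst hc; simp [pvScanStep, pvScanFlush, PySem.Dict.getD_insert, hp]
      · simp [pvScanStep, pvScanFlush, PySem.Dict.getD_insert, hp, hc]

-- the run-length scan plus final flush tallies every character
theorem pvFlushScan : ∀ (l : List Char) (st : Option Char × Int × PySem.Dict Char Int) (c : Char),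
    (pvScanFlush (l.foldl pvScanStep st)).getD c 0
      = (pvScanFlush st).getD c 0 + (l.count c : Int) := by
  intro l
  induction l with
  | nil => intro st c; simp
  | cons h t ih =>
    intro st c
    rw [List.foldl_cons, ih, pvFlushStep, List.count_cons]
    by_cases hc : c = h
    · subst hc; simp; ring
    · have hb : (h == c) = false := by simp [Ne.symm hc]
      simp [hc, hb]

-- casting the per-row Nat counts to the Int total
theorem pvCastSum (m : List String) (c : Char) :
    (((m.map (List.count c ∘ String.toList)).sum : Nat) : Int) = pvCnt m c := by
  induction m with
  | nil => simp [pvCnt]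
  | cons r rs ih =>
    simp only [pvCnt, List.map_cons, List.sum_cons, Nat.cast_add, Function.comp] at ih ⊢
    omega

-- B's counts lookup is the matrix-wide total
theorem pvCountsLookup (matrix : List String) (c : Char) :
    (pvScanFlush ((PySem.List.sorted (PySem.Str.join "" matrix).toList (fun x => x) false).foldl
        pvScanStep (none, 0, PySem.Dict.empty))).getD c 0 = pvCnt matrix c := by
  rw [pvFlushScan]
  have hperm := PySem.List.sorted_perm (PySem.Str.join "" matrix).toList (fun x : Char => x) false
  rw [hperm.count_eq c, PySem.Str.toList_join]
  have h0 : ("" : String).toList = [] := rfl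
  rw [h0, pvJoinFlatten, List.count_flatten, List.map_map]
  simp only [pvScanFlush, PySem.Dict.getD_empty, zero_add]
  exact pvCastSum matrix c

-- ===== VERDICT =====
theorem validate_amount_balls_spec : Claim_equal_validate_amount_balls := by
  intro matrix _
  unfold Spec_validate_amount_balls validate_amount_balls validate_amount_balls_alt
  simp only [pvBallsFold matrix (0,0,0,0,0,0), pvCountsLookup matrix,
    pvBallTable, List.foldl_cons, List.foldl_nil, zero_add]
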